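-- pv_equiv track=rewrite | github.com/yueguangxiaohuo/algorithm_homework | hw1.py | sort_strings
-- ===== SOURCE A (Python) =====
-- class TrieNode:
--     def __init__(self):
--         self.children = [None] * 26
--         self.is_end = False
--
-- def sort_strings(A):
--     root = TrieNode()
--     for s in A:
--         node = root
--         for char in s:
--             index = ord(char) - ord('a')
--             if not node.children[index]:
--                 node.children[index] = TrieNode()
--             node = node.children[index]
--         node.is_end = True
--     result = []
--     stack = []
--     stack.append((root, ""))
--
--     while stack:
--         node, current_prefix = stack.pop()
--         if node.is_end and current_prefix:
--             result.append(current_prefix)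
--         children = []
--         for i in range(26):
--             child = node.children[i]
--             if child is not None:
--                 char = chr(ord('a') + i)
--                 children.append((child, current_prefix + char))
--         for child in reversed(children):
--             stack.append(child)
--
--     return result
-- ===== SOURCE B (Python) =====
-- def sort_strings(A):
--     return sorted({s for s in A if s})
-- ===== Notes on version B (the rewrite author's own statement) =====
-- stated objective: simpler
-- what changed: Replaces the whole trie construction and iterative stack DFS with a one-line comparison sort over the deduplicated nonempty inputs (sorted over a set comprehension); constant-factor speedup from avoiding per-character node allocation and the 26-slot scans.
-- intended difference: On inputs where some string contains a character with code 71..96 ('G'..'`'), A silently remaps it through negative-index wraparound into a lowercase letter (e.g. ['G'] -> ['a']); B returns the strings themselves sorted (['G']), which is the intended lexicographic sort of the inputs. — e.g. on sort_strings(["G"]): A returns ["a"], B returns ["G"]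
import Mathlib
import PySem

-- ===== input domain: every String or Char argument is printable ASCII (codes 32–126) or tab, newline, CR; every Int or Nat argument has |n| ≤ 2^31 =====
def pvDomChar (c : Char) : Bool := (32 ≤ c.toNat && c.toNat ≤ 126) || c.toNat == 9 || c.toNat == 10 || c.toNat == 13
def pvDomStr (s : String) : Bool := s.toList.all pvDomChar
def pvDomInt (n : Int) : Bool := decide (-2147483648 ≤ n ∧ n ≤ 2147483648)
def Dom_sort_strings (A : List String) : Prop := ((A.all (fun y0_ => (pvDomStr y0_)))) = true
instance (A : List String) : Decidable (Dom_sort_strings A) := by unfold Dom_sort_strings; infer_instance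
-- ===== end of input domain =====

-- B replaces A's trie build + explicit-stack DFS by a one-line comparison sort of the
-- deduplicated nonempty inputs (objective: simpler).

-- ===== PORT A =====
-- The trie: Python's TrieNode (children = [None]*26, is_end) — `nil` is Python's None slot,
-- `node` a TrieNode with its 26 children as a function Fin 26 → Trie (an explicit encoding
-- of the fixed-width child array).
inductive Trie : Type where
  | nil : Trie
  | node : Bool → (Fin 26 → Trie) → Trie

def endOfT : Trie → Bool
  | .nil => false
  | .node e _ => e

def childOfT : Trie → Fin 26 → Trie
  | .nil, _ => .nil
  | .node _ f, i => f i

-- Python's `node.children[ord(char) - ord('a')]`: a possibly NEGATIVE list index, which Python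
-- wraps (children[i] = children[26+i] for -26 ≤ i < 0). `(toNat c - 97).emod 26` is exactly that
-- slot for 71 ≤ ord c ≤ 122; Pre_ excludes the other characters (A raises IndexError on them).
def idxT (c : Char) : Fin 26 :=
  ⟨((((c.toNat : Int) - 97) % 26)).toNat, by
    have h1 : (0:Int) ≤ ((c.toNat : Int) - 97) % 26 := Int.emod_nonneg _ (by norm_num)
    have h2 : ((c.toNat : Int) - 97) % 26 < 26 := Int.emod_lt_of_pos _ (by norm_num)
    omega⟩

-- the insertion loop `for char in s:` (create missing child, descend, mark the end):
-- descending into a `nil` slot is Python's `node.children[index] = TrieNode()`.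
def insertT : Trie → List Char → Trie
  | t, [] => .node true (fun i => childOfT t i)
  | t, c :: cs =>
      .node (endOfT t)
        (Function.update (fun i => childOfT t i) (idxT c) (insertT (childOfT t (idxT c)) cs))

def chF (i : Fin 26) : Char := Char.ofNat (97 + i.val)   -- chr(ord('a') + i)

-- node count of the trie (nil slots count 1): the fuel that bounds the DFS loop below.
def sizeT : Trie → Nat
  | .nil => 1
  | .node _ f => 1 + ∑ i : Fin 26, sizeT (f i)

-- the `children` list built for one popped node: non-None children with prefix+char, i = 0..25
def kidsT (t : Trie) (pre : List Char) : List (Trie × List Char) :=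
  (List.finRange 26).filterMap fun i =>
    match childOfT t i with
    | .nil => none
    | .node e f => some (.node e f, pre ++ [chF i])

-- the `while stack:` loop; head of the list is the top of the stack (Python pops from the end
-- and pushes the children reversed, i.e. processes them in order i = 0..25, as here).  The fuel
-- argument only makes the loop total; sort_strings passes enough for it never to run out
-- (dfsT_eq below is proved from `measure ≤ fuel`).
def dfsT : Nat → List (Trie × List Char) → List (List Char)
  | _, [] => []
  | 0, _ :: _ => []
  | fuel + 1, (t, pre) :: rest =>
      (if endOfT t && !pre.isEmpty then [pre] else []) ++ dfsT fuel (kidsT t pre ++ rest)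

-- strings are handled as their character lists (the PySem convention); result strings are
-- rebuilt with String.ofList at the very end.
def sort_strings (A : List String) : List String :=
  let root := A.foldl (fun t s => insertT t s.toList) (.node false fun _ => .nil)
  (dfsT (sizeT root) [(root, [])]).map String.ofList

-- ===== PORT B =====
-- Source B: return sorted({s for s in A if s})
def sort_strings_alt (A : List String) : List String :=
  PySem.List.sorted (PySem.Set.ofList (A.filter (fun s => s != ""))) (fun s => s)

-- ===== PRECONDITION & SPEC =====
-- Pre_ excludes exactly the inputs on which A raises IndexError: a string character with code
-- below 71 ('G') or above 122 ('z') yields a child index outside [-26, 25] for the 26-slot list.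
def Pre_sort_strings (A : List String) : Prop :=
  (A.all (fun s => s.toList.all (fun c => 71 ≤ c.toNat && c.toNat ≤ 122))) = true
instance (A : List String) : Decidable (Pre_sort_strings A) := by
  unfold Pre_sort_strings; infer_instance
def pvWitness_sort_strings : List String := ["ba", "a", "ba", ""]

-- On inputs where some string has a character with code 71..96 ('G'..'`'), A silently remaps it
-- through negative-index wraparound into the lowercase letter 26 slots later (e.g. ['G'] → ['a']);
-- B returns the deduplicated nonempty strings themselves in sorted order (['G']), the intended
-- lexicographic sort.
def D_sort_strings (A : List String) : Prop :=
  (A.any (fun s => s.toList.any (fun c => 71 ≤ c.toNat && c.toNat ≤ 96))) = true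
instance (A : List String) : Decidable (D_sort_strings A) := by
  unfold D_sort_strings; infer_instance

def Spec_sort_strings (A : List String) (out : List String) : Prop :=
  ¬ D_sort_strings A → out = sort_strings_alt A
instance (A : List String) (out : List String) : Decidable (Spec_sort_strings A out) := by
  unfold Spec_sort_strings; infer_instance

def pvDiffWitness_sort_strings : List String := ["G"]
def pvDiffWitnessOut_sort_strings : (List String) × (List String) := (["a"], ["G"])

-- ===== CLAIM (what is proved, stated in full; the proofs are below) =====
def Claim_unchanged_sort_strings : Prop :=
  ∀ (A : List String), Dom_sort_strings A → Pre_sort_strings A → Spec_sort_strings A (sort_strings A)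
def Claim_changed_sort_strings : Prop :=
  Dom_sort_strings (pvDiffWitness_sort_strings) ∧ Pre_sort_strings (pvDiffWitness_sort_strings) ∧ D_sort_strings (pvDiffWitness_sort_strings) ∧ sort_strings (pvDiffWitness_sort_strings) = pvDiffWitnessOut_sort_strings.1 ∧ sort_strings_alt (pvDiffWitness_sort_strings) = pvDiffWitnessOut_sort_strings.2 ∧ pvDiffWitnessOut_sort_strings.1 ≠ pvDiffWitnessOut_sort_strings.2
def Claim_exact_sort_strings : Prop :=
  ∀ (A : List String), Dom_sort_strings A → Pre_sort_strings A → D_sort_strings A → sort_strings A ≠ sort_strings_alt A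

-- ===== LEMMAS AND PROOFS =====

-- the set of end-marked paths of a trie, in DFS (prefix, then child 0..25) order
def keysT : Trie → List (List Char)
  | .nil => []
  | .node e f =>
      (if e then [[]] else []) ++
      (List.finRange 26).flatMap (fun i => (keysT (f i)).map (chF i :: ·))

def Gfun : Trie × List Char → List (List Char) :=
  fun p => ((keysT p.1).map (p.2 ++ ·)).filter (fun k => !k.isEmpty)

def measT (stack : List (Trie × List Char)) : Nat := (stack.map (fun p => sizeT p.1)).sum

-- characters
theorem chF_toNat (i : Fin 26) : (chF i).toNat = 97 + i.val := by
  have h : (97 + i.val).isValidChar := by left; omega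
  simp [chF, Char.ofNat, h]

theorem chF_lt (i j : Fin 26) (h : i < j) : chF i < chF j := by
  refine Char.lt_def.mpr (UInt32.lt_iff_toNat_lt.mpr ?_)
  have hi := chF_toNat i
  have hj := chF_toNat j
  have hij : i.val < j.val := h
  simp only [Char.toNat] at hi hj
  omega

theorem idxT_val (c : Char) (h1 : 97 ≤ c.toNat) (h2 : c.toNat ≤ 122) :
    (idxT c).val = c.toNat - 97 := by
  simp only [idxT]
  rw [Int.emod_eq_of_lt (a := (c.toNat : Int) - 97) (b := 26) (by omega) (by omega)]
  omega

theorem chF_idxT (c : Char) (h1 : 97 ≤ c.toNat) (h2 : c.toNat ≤ 122) : chF (idxT c) = c := by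
  have hv := idxT_val c h1 h2
  have hn : 97 + (idxT c).val = c.toNat := by omega
  rw [chF, hn, Char.ofNat_toNat]

-- insertT structure
theorem endOfT_insert_cons (t : Trie) (c : Char) (cs : List Char) :
    endOfT (insertT t (c :: cs)) = endOfT t := rfl

theorem childOfT_insert_cons (t : Trie) (c : Char) (cs : List Char) (i : Fin 26) :
    childOfT (insertT t (c :: cs)) i =
      if i = idxT c then insertT (childOfT t (idxT c)) cs else childOfT t i := by
  show Function.update (fun i => childOfT t i) (idxT c) (insertT (childOfT t (idxT c)) cs) i = _
  rw [Function.update_apply]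

-- membership in keysT, one level
theorem mem_keysT_iff (t : Trie) (k : List Char) :
    k ∈ keysT t ↔ (endOfT t = true ∧ k = []) ∨
      ∃ i, ∃ ks ∈ keysT (childOfT t i), k = chF i :: ks := by
  cases t with
  | nil => simp [keysT, endOfT, childOfT]
  | node e f =>
      show k ∈ (if e then [[]] else []) ++ _ ↔ (e = true ∧ k = []) ∨ _
      constructor
      · intro hk
        rcases List.mem_append.mp hk with h | h
        · cases e with
          | false => simp at h
          | true => exact Or.inl ⟨rfl, by simpa using h⟩
        · rcases List.mem_flatMap.mp h with ⟨i, -, hi⟩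
          rcases List.mem_map.mp hi with ⟨ks, hks, rfl⟩
          exact Or.inr ⟨i, ks, hks, rfl⟩
      · rintro (⟨he, rfl⟩ | ⟨i, ks, hks, rfl⟩)
        · subst he
          exact List.mem_append.mpr (Or.inl (by simp))
        · exact List.mem_append.mpr (Or.inr (List.mem_flatMap.mpr
            ⟨i, List.mem_finRange i, List.mem_map.mpr ⟨ks, hks, rfl⟩⟩))

theorem mem_keysT_insert (s : List Char) (hs : ∀ c ∈ s, 97 ≤ c.toNat ∧ c.toNat ≤ 122)
    (t : Trie) (k : List Char) : k ∈ keysT (insertT t s) ↔ k = s ∨ k ∈ keysT t := by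
  induction s generalizing t k with
  | nil =>
      rw [mem_keysT_iff, mem_keysT_iff t]
      rw [show endOfT (insertT t []) = true from rfl]
      simp only [true_and]
      constructor
      · rintro (rfl | ⟨i, ks, hks, rfl⟩)
        · exact Or.inl rfl
        · exact Or.inr (Or.inr ⟨i, ks, hks, rfl⟩)
      · rintro (rfl | (⟨he, rfl⟩ | ⟨i, ks, hks, rfl⟩))
        · exact Or.inl rfl
        · exact Or.inl rfl
        · exact Or.inr ⟨i, ks, hks, rfl⟩
  | cons c cs ih =>
      have hc := hs c (by simp)
      have hcs : ∀ c' ∈ cs, 97 ≤ c'.toNat ∧ c'.toNat ≤ 122 := fun c' h' => hs c' (by simp [h'])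
      rw [mem_keysT_iff, mem_keysT_iff t]
      simp only [endOfT_insert_cons, childOfT_insert_cons]
      constructor
      · rintro (⟨he, rfl⟩ | ⟨i, ks, hks, rfl⟩)
        · tauto
        · by_cases hi : i = idxT c
          · subst hi
            rw [if_pos rfl] at hks
            rcases (ih hcs _ ks).mp hks with rfl | hmem
            · exact Or.inl (by rw [chF_idxT c hc.1 hc.2])
            · exact Or.inr (Or.inr ⟨_, ks, hmem, rfl⟩)
          · rw [if_neg hi] at hks
            exact Or.inr (Or.inr ⟨i, ks, hks, rfl⟩)
      · rintro (rfl | (⟨he, rfl⟩ | ⟨i, ks, hks, rfl⟩))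
        · refine Or.inr ⟨idxT c, cs, ?_, by rw [chF_idxT c hc.1 hc.2]⟩
          rw [if_pos rfl]
          exact (ih hcs _ cs).mpr (Or.inl rfl)
        · tauto
        · by_cases hi : i = idxT c
          · subst hi
            refine Or.inr ⟨idxT c, ks, ?_, rfl⟩
            rw [if_pos rfl]
            exact (ih hcs _ ks).mpr (Or.inr hks)
          · exact Or.inr ⟨i, ks, by rw [if_neg hi]; exact hks, rfl⟩

-- keysT is strictly sorted lexicographically
theorem pairwise_flatMap_blocks (f : Fin 26 → Trie)
    (h : ∀ i, (keysT (f i)).Pairwise (fun k k' => List.Lex (· < ·) k k'))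
    (l : List (Fin 26)) (hl : l.Pairwise (· < ·)) :
    (l.flatMap (fun i => (keysT (f i)).map (chF i :: ·))).Pairwise
      (fun k k' => List.Lex (· < ·) k k') := by
  induction l with
  | nil => simp
  | cons i l ih =>
      rw [List.flatMap_cons, List.pairwise_append]
      refine ⟨(h i).map _ (fun a b hab => List.Lex.cons hab), ih hl.of_cons, ?_⟩
      rintro x hx y hy
      rcases List.mem_map.mp hx with ⟨kx, -, rfl⟩
      rcases List.mem_flatMap.mp hy with ⟨j, hj, hyj⟩
      rcases List.mem_map.mp hyj with ⟨ky, -, rfl⟩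
      exact List.Lex.rel (chF_lt i j (List.rel_of_pairwise_cons hl hj))

theorem keysT_pairwise (t : Trie) :
    (keysT t).Pairwise (fun k k' => List.Lex (· < ·) k k') := by
  induction t with
  | nil => simp [keysT]
  | node e f ih =>
      rw [keysT, List.pairwise_append]
      refine ⟨by cases e <;> simp, pairwise_flatMap_blocks f ih _ (List.pairwise_lt_finRange 26), ?_⟩
      intro a ha b hb
      have ha' : a = [] := by cases e <;> simp_all
      subst ha'
      rcases List.mem_flatMap.mp hb with ⟨j, -, hbj⟩
      rcases List.mem_map.mp hbj with ⟨kb, -, rfl⟩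
      exact List.Lex.nil

-- every character of every key is a lowercase letter code (≥ 97)
theorem keysT_chars (t : Trie) : ∀ k ∈ keysT t, ∀ c ∈ k, 97 ≤ c.toNat := by
  induction t with
  | nil => simp [keysT]
  | node e f ih =>
      intro k hk c hc
      rw [keysT, List.mem_append] at hk
      rcases hk with hk | hk
      · have : k = [] := by cases e <;> simp_all
        subst this; simp at hc
      · rcases List.mem_flatMap.mp hk with ⟨i, -, hki⟩
        rcases List.mem_map.mp hki with ⟨ks, hks, rfl⟩
        rcases List.mem_cons.mp hc with rfl | hc'
        · rw [chF_toNat]; omega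
        · exact ih i ks hks c hc'

-- the DFS loop terminates within sizeT fuel and lists exactly the keys
theorem sizeT_pos (t : Trie) : 1 ≤ sizeT t := by cases t <;> simp [sizeT]

theorem measT_kidsT (t : Trie) (pre : List Char) : measT (kidsT t pre) < sizeT t := by
  cases t with
  | nil =>
      have h : kidsT .nil pre = [] := by simp [kidsT, childOfT]
      simp [h, measT, sizeT]
  | node e f =>
      have key : ∀ l : List (Fin 26),
          measT (l.filterMap (fun i =>
            match f i with
            | .nil => none
            | .node e' f' => some (.node e' f', pre ++ [chF i]))) ≤
          (l.map (fun i => sizeT (f i))).sum := by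
        intro l
        induction l with
        | nil => simp [measT]
        | cons i l ihl =>
            rw [List.filterMap_cons]
            cases h : f i with
            | nil =>
                simp only [h, List.map_cons, List.sum_cons]
                simp only [measT] at ihl ⊢
                omega
            | node e' f' =>
                simp only [h, List.map_cons, List.sum_cons]
                simp only [measT, List.map_cons, List.sum_cons] at ihl ⊢
                omega
      have hk : kidsT (.node e f) pre = (List.finRange 26).filterMap (fun i =>
          match f i with
          | .nil => none
          | .node e' f' => some (.node e' f', pre ++ [chF i])) := by
        simp [kidsT, childOfT]
      rw [hk, sizeT, Fin.sum_univ_def]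
      have := key (List.finRange 26)
      omega

theorem block_filter (u : Trie) (pre : List Char) (c : Char) :
    ((keysT u).map (fun k => pre ++ c :: k)).filter (fun k => !k.isEmpty) =
      (keysT u).map (fun k => pre ++ c :: k) := by
  rw [List.filter_eq_self]
  intro a ha
  rcases List.mem_map.mp ha with ⟨k, -, rfl⟩
  simp

theorem flat_kids (t : Trie) (pre : List Char) :
    (kidsT t pre).flatMap Gfun =
      (List.finRange 26).flatMap (fun i => (keysT (childOfT t i)).map (fun k => pre ++ chF i :: k)) := by
  rw [kidsT]
  generalize List.finRange 26 = l
  induction l with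
  | nil => simp
  | cons i l ih =>
      rw [List.flatMap_cons]
      cases h : childOfT t i with
      | nil => simp [h, ih, keysT]
      | node e' f' =>
          rw [List.filterMap_cons]
          simp only [h]
          rw [List.flatMap_cons, ih]
          congr 1
          show Gfun (.node e' f', pre ++ [chF i]) = _
          rw [Gfun]
          simp only []
          have : (keysT (.node e' f')).map ((pre ++ [chF i]) ++ ·) =
              (keysT (.node e' f')).map (fun k => pre ++ chF i :: k) := by
            apply List.map_congr_left
            intro k _
            simp
          rw [this, block_filter]

theorem G_node (t : Trie) (pre : List Char) :
    Gfun (t, pre) = (if endOfT t && !pre.isEmpty then [pre] else []) ++ (kidsT t pre).flatMap Gfun := by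
  rw [flat_kids]
  cases t with
  | nil => simp [Gfun, keysT, endOfT, childOfT]
  | node e f =>
      rw [Gfun]
      simp only [keysT, endOfT, childOfT, List.map_append, List.filter_append]
      congr 1
      · cases e with
        | false => simp
        | true =>
            cases pre <;> simp [List.filter]
      · rw [List.map_flatMap, List.filter_flatMap]
        simp only [List.map_map]
        congr 1
        funext i
        have hb := block_filter (f i) pre (chF i)
        have hm : (keysT (f i)).map ((pre ++ ·) ∘ (chF i :: ·)) =
            (keysT (f i)).map (fun k => pre ++ chF i :: k) := by
          apply List.map_congr_left; intro k _; simp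
        rw [hm, hb]

theorem dfsT_eq (fuel : Nat) (stack : List (Trie × List Char)) (h : measT stack ≤ fuel) :
    dfsT fuel stack = stack.flatMap Gfun := by
  induction fuel generalizing stack with
  | zero =>
      cases stack with
      | nil => simp [dfsT]
      | cons p rest =>
          exfalso
          have := sizeT_pos p.1
          simp [measT] at h
          omega
  | succ n ih =>
      cases stack with
      | nil => simp [dfsT]
      | cons p rest =>
          obtain ⟨t, pre⟩ := p
          rw [dfsT]
          have hm : measT (kidsT t pre ++ rest) ≤ n := by
            have h1 := measT_kidsT t pre
            simp only [measT, List.map_append, List.sum_append, List.map_cons, List.sum_cons] at h ⊢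
            have : measT (kidsT t pre) = ((kidsT t pre).map (fun p => sizeT p.1)).sum := rfl
            omega
          rw [ih _ hm, List.flatMap_cons, List.flatMap_append, ← List.append_assoc, ← G_node]



-- the set of end-marked paths of a trie, in DFS order
theorem sort_strings_eq (A : List String) :
    sort_strings A =
      ((keysT (A.foldl (fun t s => insertT t s.toList) (.node false fun _ => .nil))).filter
        (fun k => !k.isEmpty)).map String.ofList := by
  unfold sort_strings
  dsimp only
  rw [dfsT_eq _ _ (by simp [measT])]
  simp [Gfun]

theorem keysT_empty : keysT (.node false fun _ => .nil) = [] := by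
  simp [keysT]

theorem mem_keysT_foldl (A : List String)
    (hA : ∀ s ∈ A, ∀ c ∈ s.toList, 97 ≤ c.toNat ∧ c.toNat ≤ 122) (t : Trie) (k : List Char) :
    k ∈ keysT (A.foldl (fun t s => insertT t s.toList) t) ↔
      (∃ s ∈ A, k = s.toList) ∨ k ∈ keysT t := by
  induction A generalizing t with
  | nil => simp
  | cons a A ih =>
      have ha := hA a (by simp)
      have hA' : ∀ s ∈ A, ∀ c ∈ s.toList, 97 ≤ c.toNat ∧ c.toNat ≤ 122 :=
        fun s hs => hA s (by simp [hs])
      rw [List.foldl_cons, ih hA', mem_keysT_insert a.toList ha]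
      constructor
      · rintro (⟨s, hs, rfl⟩ | (rfl | hk))
        · exact Or.inl ⟨s, by simp [hs], rfl⟩
        · exact Or.inl ⟨a, by simp, rfl⟩
        · exact Or.inr hk
      · rintro (⟨s, hs, rfl⟩ | hk)
        · rcases List.mem_cons.mp hs with rfl | hs'
          · exact Or.inr (Or.inl rfl)
          · exact Or.inl ⟨s, hs', rfl⟩
        · exact Or.inr (Or.inr hk)

theorem lex_ofList_lt (k k' : List Char) (h : List.Lex (· < ·) k k') :
    String.ofList k < String.ofList k' := by
  rw [String.lt_iff_toList_lt, String.toList_ofList, String.toList_ofList]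
  exact (List.lt_iff_lex_lt k k').mpr h

theorem sort_main (A : List String)
    (h : ∀ s ∈ A, ∀ c ∈ s.toList, 97 ≤ c.toNat ∧ c.toNat ≤ 122) :
    sort_strings A = sort_strings_alt A := by
  rw [sort_strings_eq]
  unfold sort_strings_alt
  symm
  apply PySem.List.sorted_eq_of_perm_of_pairwise_lt
  · -- permutation: same members, both lists nodup
    have hpair : (((keysT (A.foldl (fun t s => insertT t s.toList) (.node false fun _ => .nil))).filter
        (fun k => !k.isEmpty)).map String.ofList).Pairwise (· < ·) :=
      ((List.Pairwise.sublist List.filter_sublist (keysT_pairwise _)).map _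
        (fun a b hab => lex_ofList_lt a b hab))
    refine (List.perm_ext_iff_of_nodup (hpair.imp ne_of_lt) (PySem.Set.nodup_ofList _)).mpr ?_
    intro x
    rw [PySem.Set.mem_ofList, List.mem_filter, List.mem_map]
    constructor
    · rintro ⟨k, hk, rfl⟩
      rw [List.mem_filter] at hk
      rcases (mem_keysT_foldl A h _ k).mp hk.1 with ⟨s, hs, rfl⟩ | hk0
      · refine ⟨by simpa [String.ofList_toList] using hs, ?_⟩
        have : s.toList ≠ [] := by
          intro h0
          rw [h0] at hk
          simp at hk
        simp [String.ofList_toList, bne_iff_ne]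
        intro h0
        exact this (by rw [h0]; rfl)
      · rw [keysT_empty] at hk0
        simp at hk0
    · rintro ⟨hx, hne⟩
      refine ⟨x.toList, ?_, String.ofList_toList⟩
      rw [List.mem_filter]
      refine ⟨(mem_keysT_foldl A h _ _).mpr (Or.inl ⟨x, hx, rfl⟩), ?_⟩
      rw [bne_iff_ne] at hne
      simp [String.toList_eq_nil_iff]
      intro h0
      exact hne h0
  · -- strictly increasing
    exact ((List.Pairwise.sublist List.filter_sublist (keysT_pairwise _)).map _
      (fun a b hab => lex_ofList_lt a b hab))

-- ===== VERDICT (by name: the statement is the Claim_ definition above) =====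
theorem sort_strings_spec : Claim_unchanged_sort_strings := by
  intro A _ hPre hD
  apply sort_main
  intro s hs c hc
  simp only [Pre_sort_strings, List.all_eq_true, Bool.and_eq_true, decide_eq_true_eq] at hPre
  have h1 := hPre s hs c hc
  refine ⟨?_, h1.2⟩
  by_contra hlt
  apply hD
  simp only [D_sort_strings, List.any_eq_true, Bool.and_eq_true, decide_eq_true_eq]
  exact ⟨s, hs, c, hc, by omega⟩

set_option maxRecDepth 100000 in
theorem sort_strings_changed : Claim_changed_sort_strings := by
  unfold Claim_changed_sort_strings
  refine ⟨by decide, by decide, by decide, by decide, ?_, by decide⟩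
  apply PySem.List.sorted_eq_of_perm_of_pairwise_lt
  · decide
  · decide

theorem sort_strings_tight : Claim_exact_sort_strings := by
  intro A _ _ hD heq
  simp only [D_sort_strings, List.any_eq_true, Bool.and_eq_true, decide_eq_true_eq] at hD
  obtain ⟨s, hs, c, hc, h71, h96⟩ := hD
  have hsne : s ≠ "" := by
    intro h0
    rw [h0] at hc
    simp at hc
  -- s is in B's output …
  have hmemB : s ∈ sort_strings_alt A := by
    unfold sort_strings_alt
    rw [PySem.List.mem_sorted, PySem.Set.mem_ofList, List.mem_filter]
    exact ⟨hs, by simp [bne_iff_ne, hsne]⟩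
  -- … but every string A outputs consists of characters with code ≥ 97, and c.toNat ≤ 96
  rw [← heq, sort_strings_eq] at hmemB
  rcases List.mem_map.mp hmemB with ⟨k, hk, hks⟩
  rw [List.mem_filter] at hk
  have hch := keysT_chars _ k hk.1 c (by rw [← hks, String.toList_ofList] at hc; exact hc)
  omega
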